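-- pv_equiv track=rewrite | github.com/nguyenngochuy91/programming | interview/arrays.py | createAnagram
-- ===== SOURCE A (Python) =====
-- def createAnagram(s, t):
--     ds = {}
--     dt = {}
--     l = "ABCDEFGHIJKLMNOPQRSTUVWXYZ"
--     for letter in l:
--         ds[letter]=0
--         dt[letter]=0
--     for item in s:
--         ds[item]+=1
--     for item in t:
--         dt[item]+=1
--     swap = 0 # swapping
--     leftOver = 0
--     for letter in l:
--         vs = ds[letter]
--         vt = dt[letter]
--         if vs==vt:
--             continue
--         elif vs<vt:
--             extra = vs-vt
--             if leftOver>=0: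
--                 swap+=min(leftOver,-extra)
--             leftOver+=extra
--         else:
--             extra= vs-vt
--             if leftOver<=0:
--                 swap +=min(-leftOver,extra)
--             leftOver+=extra
--     return swap
-- ===== SOURCE B (Python) =====
-- def createAnagram(s, t):
--     ds = {}
--     dt = {}
--     l = "ABCDEFGHIJKLMNOPQRSTUVWXYZ"
--     for letter in l:
--         ds[letter] = 0
--         dt[letter] = 0
--     for item in s:
--         ds[item] += 1
--     for item in t:
--         dt[item] += 1
--     surplus = 0
--     deficit = 0
--     for letter in l:
--         d = ds[letter] - dt[letter]
--         if d > 0: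
--             surplus += d
--         else:
--             deficit -= d
--     return min(surplus, deficit)
-- ===== Notes on version B (the rewrite author's own statement) =====
-- stated objective: simpler
-- what changed: The order-dependent running-balance sweep (swap/leftOver with three sign branches) is replaced by two independent aggregations over the alphabet, surplus = sum of positive count differences and deficit = sum of negative ones, returning min(surplus, deficit).
import Mathlib
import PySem

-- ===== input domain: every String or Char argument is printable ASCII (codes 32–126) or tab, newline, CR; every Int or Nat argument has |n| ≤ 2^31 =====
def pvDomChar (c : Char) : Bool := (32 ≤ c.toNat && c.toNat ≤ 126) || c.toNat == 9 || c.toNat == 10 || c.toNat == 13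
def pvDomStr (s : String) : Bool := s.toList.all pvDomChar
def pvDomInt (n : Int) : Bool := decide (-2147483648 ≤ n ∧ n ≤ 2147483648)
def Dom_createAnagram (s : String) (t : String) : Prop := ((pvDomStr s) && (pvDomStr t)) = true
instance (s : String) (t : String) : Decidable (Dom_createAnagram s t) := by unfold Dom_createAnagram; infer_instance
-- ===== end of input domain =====

-- Header: B replaces A's running-balance sweep by two independent sums (surplus and deficit
-- of letter-count differences) and returns their minimum; objective: simpler.

-- ===== PORT A =====
-- the alphabet string A iterates over
def agLetters : List Char := "ABCDEFGHIJKLMNOPQRSTUVWXYZ".toList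

-- seeding loop: 'for letter in l: ds[letter]=0; dt[letter]=0' on the pair (ds, dt)
def agZeros : PySem.Dict Char Int × PySem.Dict Char Int :=
  agLetters.foldl (fun p c => (p.1.insert c 0, p.2.insert c 0))
    (PySem.Dict.empty, PySem.Dict.empty)

-- counting loop 'for item in u: d[item]+=1' (Dict.modify; exact under Pre_, which
-- excludes the non-A–Z characters on which Python's d[item] raises KeyError)
def agCount (d : PySem.Dict Char Int) (u : String) : PySem.Dict Char Int :=
  u.toList.foldl (fun d x => d.modify x 0 (· + 1)) d

def createAnagram (s : String) (t : String) : Int :=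
  let ds := agCount agZeros.1 s
  let dt := agCount agZeros.2 t
  (agLetters.foldl (fun (st : Int × Int) letter =>
      let vs := ds.getD letter 0
      let vt := dt.getD letter 0
      if vs = vt then st
      else if vs < vt then
        let extra := vs - vt
        let swap := if st.2 ≥ 0 then st.1 + min st.2 (-extra) else st.1
        (swap, st.2 + extra)
      else
        let extra := vs - vt
        let swap := if st.2 ≤ 0 then st.1 + min (-st.2) extra else st.1
        (swap, st.2 + extra)) ((0 : Int), (0 : Int))).1

-- ===== PORT B =====
def createAnagram_alt (s : String) (t : String) : Int :=
  let ds := agCount agZeros.1 s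
  let dt := agCount agZeros.2 t
  let sd := agLetters.foldl (fun (sd : Int × Int) letter =>
      let d := ds.getD letter 0 - dt.getD letter 0
      if d > 0 then (sd.1 + d, sd.2) else (sd.1, sd.2 - d)) ((0 : Int), (0 : Int))
  min sd.1 sd.2

-- ===== PRECONDITION & SPEC =====
-- Pre_ excludes exactly the inputs containing a character outside 'A'..'Z',
-- on which Python A (and B) raise KeyError.
def Pre_createAnagram (s : String) (t : String) : Prop :=
  (s.toList.all (fun c => 65 ≤ c.toNat && c.toNat ≤ 90)
    && t.toList.all (fun c => 65 ≤ c.toNat && c.toNat ≤ 90)) = true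
instance (s : String) (t : String) : Decidable (Pre_createAnagram s t) := by
  unfold Pre_createAnagram; infer_instance
def pvWitness_createAnagram : String × String := ("AAB", "ABB")

def Spec_createAnagram (s : String) (t : String) (out : Int) : Prop := out = createAnagram_alt s t
instance (s : String) (t : String) (out : Int) : Decidable (Spec_createAnagram s t out) := by unfold Spec_createAnagram; infer_instance

-- ===== CLAIM (what is proved, stated in full; the proofs are below) =====
def Claim_equal_createAnagram : Prop := ∀ (s : String) (t : String), Dom_createAnagram s t → Pre_createAnagram s t → Spec_createAnagram s t (createAnagram s t)

-- ===== LEMMAS AND PROOFS =====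

-- positive and negative parts of a list of differences
def agPos (ds : List Int) : Int := (ds.map (fun d => max d 0)).sum
def agNeg (ds : List Int) : Int := (ds.map (fun d => max (-d) 0)).sum

-- the zero-seeded dicts look up 0 at every key
lemma agZerosAux_getD (L : List Char) (d : PySem.Dict Char Int)
    (h : ∀ c, d.getD c 0 = 0) (c : Char) :
    (L.foldl (fun d c => d.insert c 0) d).getD c 0 = 0 := by
  induction L generalizing d with
  | nil => exact h c
  | cons a L ih =>
    refine ih _ (fun c' => ?_)
    by_cases hc : c' = a
    · subst hc; exact PySem.Dict.getD_insert_self _ _ _ _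
    · rw [PySem.Dict.getD_insert_of_ne _ _ _ hc]; exact h c'

lemma agZeros_fst_getD (c : Char) : agZeros.1.getD c 0 = 0 := by
  have h : agZeros.1 = agLetters.foldl (fun d c => d.insert c 0) PySem.Dict.empty := by
    unfold agZeros
    rw [PySem.List.foldl_prod_mk (fun d c => PySem.Dict.insert d c (0:Int))
      (fun d c => PySem.Dict.insert d c (0:Int)) agLetters PySem.Dict.empty PySem.Dict.empty]
  rw [h]
  exact agZerosAux_getD _ _ (fun c => by simp [PySem.Dict.getD, PySem.Dict.get?, PySem.Dict.empty]) c

lemma agZeros_snd_getD (c : Char) : agZeros.2.getD c 0 = 0 := by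
  have h : agZeros.2 = agLetters.foldl (fun d c => d.insert c 0) PySem.Dict.empty := by
    unfold agZeros
    rw [PySem.List.foldl_prod_mk (fun d c => PySem.Dict.insert d c (0:Int))
      (fun d c => PySem.Dict.insert d c (0:Int)) agLetters PySem.Dict.empty PySem.Dict.empty]
  rw [h]
  exact agZerosAux_getD _ _ (fun c => by simp [PySem.Dict.getD, PySem.Dict.get?, PySem.Dict.empty]) c

-- the counting dicts look up the character counts
lemma agCount_fst_getD (u : String) (c : Char) :
    (agCount agZeros.1 u).getD c 0 = (u.toList.count c : Int) := by
  unfold agCount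
  rw [PySem.Dict.getD_foldl_modify_add_one, agZeros_fst_getD, zero_add]

lemma agCount_snd_getD (u : String) (c : Char) :
    (agCount agZeros.2 u).getD c 0 = (u.toList.count c : Int) := by
  unfold agCount
  rw [PySem.Dict.getD_foldl_modify_add_one, agZeros_snd_getD, zero_add]

-- the sweep step of A, on the difference alone
def agSweepStep (st : Int × Int) (d : Int) : Int × Int :=
  if (0 : Int) + d = 0 + 0 then st
  else if (0 : Int) + d < 0 then
    let swap := if st.2 ≥ 0 then st.1 + min st.2 (-d) else st.1
    (swap, st.2 + d)
  else
    let swap := if st.2 ≤ 0 then st.1 + min (-st.2) d else st.1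
    (swap, st.2 + d)

-- main invariant: A's sweep computes min of the accumulated positive/negative parts
lemma agSweep_invariant (ds : List Int) (P N : Int) (hP : 0 ≤ P) (hN : 0 ≤ N) :
    ds.foldl agSweepStep (min P N, P - N)
      = (min (P + agPos ds) (N + agNeg ds), (P + agPos ds) - (N + agNeg ds)) := by
  induction ds generalizing P N with
  | nil => simp [agPos, agNeg]
  | cons d rest ih =>
    have hstep : agSweepStep (min P N, P - N) d
        = (min (P + max d 0) (N + max (-d) 0), (P + max d 0) - (N + max (-d) 0)) := by
      unfold agSweepStep
      split_ifs with h1 h2 h3 h4 <;> simp_all <;> omega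
    have hrec := ih (P + max d 0) (N + max (-d) 0)
      (by have := le_max_right d 0; omega) (by have := le_max_right (-d) 0; omega)
    simp only [List.foldl_cons, hstep, hrec, agPos, agNeg, List.map_cons, List.sum_cons,
      Prod.mk.injEq]
    constructor <;> omega

-- B's accumulation computes the positive/negative parts
lemma agSums (ds : List Int) (a b : Int) :
    ds.foldl (fun (sd : Int × Int) d =>
        if d > 0 then (sd.1 + d, sd.2) else (sd.1, sd.2 - d)) (a, b)
      = (a + agPos ds, b + agNeg ds) := by
  induction ds generalizing a b with
  | nil => simp [agPos, agNeg]
  | cons d rest ih =>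
    simp only [List.foldl_cons, agPos, agNeg, List.map_cons, List.sum_cons]
    by_cases hd : d > 0
    · rw [if_pos hd, ih]
      simp only [agPos, agNeg, Prod.mk.injEq]
      constructor <;> omega
    · rw [if_neg hd, ih]
      simp only [agPos, agNeg, Prod.mk.injEq]
      constructor <;> omega

-- the per-letter difference list both ports fold over
def agDiffs (s t : String) : List Int :=
  agLetters.map (fun c => (s.toList.count c : Int) - (t.toList.count c : Int))

-- A's fold over letters is the sweep over the difference list
lemma createAnagram_eq_sweep (s t : String) :
    createAnagram s t = ((agDiffs s t).foldl agSweepStep (0, 0)).1 := by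
  simp only [createAnagram, agDiffs]
  congr 1
  rw [List.foldl_map]
  apply PySem.List.foldl_congr_mem
  intro st c _hc
  simp only [agCount_fst_getD, agCount_snd_getD, agSweepStep]
  split_ifs <;> first | rfl | (exfalso; omega)

-- B's fold over letters is the pos/neg sums over the difference list
lemma createAnagram_alt_eq_minSums (s t : String) :
    createAnagram_alt s t = min (agPos (agDiffs s t)) (agNeg (agDiffs s t)) := by
  simp only [createAnagram_alt, agDiffs]
  have hcongr : agLetters.foldl (fun (sd : Int × Int) c =>
        if (agCount agZeros.1 s).getD c 0 - (agCount agZeros.2 t).getD c 0 > 0 then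
          (sd.1 + ((agCount agZeros.1 s).getD c 0 - (agCount agZeros.2 t).getD c 0), sd.2)
        else (sd.1, sd.2 - ((agCount agZeros.1 s).getD c 0 - (agCount agZeros.2 t).getD c 0)))
        ((0:Int), (0:Int))
      = (agLetters.map (fun c => (s.toList.count c : Int) - (t.toList.count c : Int))).foldl
          (fun (sd : Int × Int) d => if d > 0 then (sd.1 + d, sd.2) else (sd.1, sd.2 - d))
          ((0:Int), (0:Int)) := by
    rw [List.foldl_map]
    apply PySem.List.foldl_congr_mem
    intro st c _hc
    simp only [agCount_fst_getD, agCount_snd_getD]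
  rw [hcongr, agSums]
  simp

-- ===== VERDICT (by name: the statement is the Claim_ definition above) =====
theorem createAnagram_spec : Claim_equal_createAnagram := by
  intro s t _hdom _hpre
  unfold Spec_createAnagram
  rw [createAnagram_eq_sweep, createAnagram_alt_eq_minSums]
  have h := agSweep_invariant (agDiffs s t) 0 0 le_rfl le_rfl
  simp only [min_self, sub_zero, zero_add] at h
  rw [show ((0:Int), (0:Int)) = ((min 0 0 : Int), (0:Int) - 0) by simp] at h ⊢
  rw [agSweep_invariant (agDiffs s t) 0 0 le_rfl le_rfl]
  simp
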